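-- pv_equiv track=rewrite | github.com/wiley-whisker/English-Language-Technology-Tools- | Project/count_words.py | remove_apostrophes
-- ===== SOURCE A (Python) =====
-- def remove_apostrophes(text: str) -> str:
--     indeces_for_del = set()
--     for i in range(len(text)):
--         if text[i] == "'":
--             for j in range(i, len(text)):
--                 if text[j] == ' ':
--                     break
--                 indeces_for_del.add(j)
--     new_text = ''
--     for i in range(len(text)):
--         if i not in indeces_for_del:
--             new_text += text[i]
--     return new_text
-- ===== SOURCE B (Python) =====
-- def remove_apostrophes(text: str) -> str:
--     return ' '.join(tok.split("'")[0] for tok in text.split(' '))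
-- ===== Notes on version B (the rewrite author's own statement) =====
-- stated objective: idiomatic
-- what changed: A marks character indices for deletion with a set built by a nested index scan and then rebuilds the string index by index; B splits the text on single spaces, truncates each token at its first apostrophe, and rejoins the tokens with single spaces.
import Mathlib
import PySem

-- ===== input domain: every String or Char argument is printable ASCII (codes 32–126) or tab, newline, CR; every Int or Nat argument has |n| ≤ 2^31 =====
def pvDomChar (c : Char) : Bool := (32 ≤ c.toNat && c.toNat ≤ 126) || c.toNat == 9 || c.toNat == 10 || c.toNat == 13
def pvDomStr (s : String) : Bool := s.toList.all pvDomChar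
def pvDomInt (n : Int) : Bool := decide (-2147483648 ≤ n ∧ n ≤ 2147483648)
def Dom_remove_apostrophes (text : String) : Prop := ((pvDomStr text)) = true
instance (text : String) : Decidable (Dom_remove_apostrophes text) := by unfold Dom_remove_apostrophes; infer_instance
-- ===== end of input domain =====

-- B replaces A's quadratic index-marking set and character-by-character rebuild with an
-- idiomatic split-on-space / cut-at-first-apostrophe / rejoin pipeline (objective: idiomatic).

-- ===== PORT A =====
-- inner "for j in range(i, len(text)): if text[j] == ' ': break; S.add(j)" (a for-loop with break)
def pvMarkRun (cs : List Char) : List Nat → List Nat → List Nat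
  | S, [] => S
  | S, j :: rest => if cs.getD j ' ' = ' ' then S else pvMarkRun cs (PySem.Set.add S j) rest

def remove_apostrophes (text : String) : String :=
  let cs := text.toList
  let n := cs.length
  let dels : PySem.Set Nat := (List.range n).foldl
    (fun S i => if cs.getD i ' ' = '\'' then pvMarkRun cs S (List.range' i (n - i)) else S)
    PySem.Set.empty
  let newText : List Char := (List.range n).foldl
    (fun acc i => if i ∈ dels then acc else acc ++ [cs.getD i ' ']) []
  String.ofList newText

-- ===== PORT B =====
def remove_apostrophes_alt (text : String) : String :=
  PySem.Str.join " " (((PySem.Str.split? text " ").getD []).map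
    (fun tok => ((PySem.Str.split? tok "'").getD []).getD 0 ""))

-- ===== PRECONDITION & SPEC =====
def Spec_remove_apostrophes (text : String) (out : String) : Prop := out = remove_apostrophes_alt text
instance (text : String) (out : String) : Decidable (Spec_remove_apostrophes text out) := by unfold Spec_remove_apostrophes; infer_instance

-- ===== CLAIM (what is proved, stated in full; the proofs are below) =====
def Claim_equal_remove_apostrophes : Prop := ∀ (text : String), Dom_remove_apostrophes text → Spec_remove_apostrophes text (remove_apostrophes text)

-- ===== LEMMAS AND PROOFS =====

-- single left-to-right pass with a "currently deleting" flag: the common meeting point of both ports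
def pvGo : Bool → List Char → List Char
  | _, [] => []
  | del, c :: cs =>
    if c = ' ' then ' ' :: pvGo false cs
    else if del then pvGo del cs
    else if c = '\'' then pvGo true cs
    else c :: pvGo false cs

-- split on a single character, as (first piece, remaining pieces)
def pvSplitc (sepc : Char) : List Char → List Char × List (List Char)
  | [] => ([], [])
  | c :: rest =>
    if c = sepc then ([], (pvSplitc sepc rest).1 :: (pvSplitc sepc rest).2)
    else (c :: (pvSplitc sepc rest).1, (pvSplitc sepc rest).2)

-- "no space among positions k..i of cs"
def pvNoSpace (cs : List Char) (k i : Nat) : Bool :=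
  (List.range' k (i + 1 - k)).all (fun j => !(cs.getD j ' ' == ' '))

-- "position i of cs is deleted" given the deleting flag carried into cs
def pvMarked (del : Bool) (cs : List Char) (i : Nat) : Bool :=
  (List.range (i + 1)).any (fun k => (cs.getD k ' ' == '\'') && pvNoSpace cs k i)
    || (del && pvNoSpace cs 0 i)

lemma pvNoSpace_iff (cs : List Char) (k i : Nat) :
    pvNoSpace cs k i = true ↔ ∀ j, k ≤ j → j ≤ i → cs.getD j ' ' ≠ ' ' := by
  simp only [pvNoSpace, List.all_eq_true, List.mem_range'_1, Bool.not_eq_eq_eq_not, Bool.not_true,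
    beq_eq_false_iff_ne, ne_eq]
  constructor
  · intro h j h1 h2; exact h j ⟨h1, by omega⟩
  · intro h j ⟨h1, h2⟩; exact h j h1 (by omega)

lemma pvMarked_iff (del : Bool) (cs : List Char) (i : Nat) :
    pvMarked del cs i = true ↔
      ((∃ k, k ≤ i ∧ cs.getD k ' ' = '\'' ∧ ∀ j, k ≤ j → j ≤ i → cs.getD j ' ' ≠ ' ')
        ∨ (del = true ∧ ∀ j, j ≤ i → cs.getD j ' ' ≠ ' ')) := by
  simp only [pvMarked, Bool.or_eq_true, List.any_eq_true, List.mem_range, Bool.and_eq_true,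
    beq_iff_eq, pvNoSpace_iff, Nat.lt_succ_iff]
  constructor
  · rintro (⟨k, hk, h1, h2⟩ | ⟨hd, h⟩)
    · exact Or.inl ⟨k, hk, h1, h2⟩
    · exact Or.inr ⟨hd, fun j hj => h j (Nat.zero_le j) hj⟩
  · rintro (⟨k, hk, h1, h2⟩ | ⟨hd, h⟩)
    · exact Or.inl ⟨k, hk, h1, h2⟩
    · exact Or.inr ⟨hd, fun j _ hj => h j hj⟩

lemma pvMarked_zero (del : Bool) (c : Char) (cs : List Char) :
    pvMarked del (c :: cs) 0 = ((c == '\'') || (del && !(c == ' '))) := by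
  rw [Bool.eq_iff_iff, pvMarked_iff]
  simp only [Bool.or_eq_true, Bool.and_eq_true, beq_iff_eq, Bool.not_eq_eq_eq_not, Bool.not_true,
    beq_eq_false_iff_ne, ne_eq]
  constructor
  · rintro (⟨k, hk, h1, _⟩ | ⟨hd, h⟩)
    · interval_cases k; exact Or.inl h1
    · exact Or.inr ⟨hd, by simpa using h 0 (le_refl 0)⟩
  · rintro (h | ⟨hd, h⟩)
    · refine Or.inl ⟨0, le_refl 0, h, ?_⟩
      intro j h1 h2
      have : j = 0 := by omega
      subst this
      simp only [List.getD_cons_zero]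
      rw [h]; decide
    · refine Or.inr ⟨hd, ?_⟩
      intro j hj
      have : j = 0 := by omega
      subst this; simpa using h

lemma pvMarked_succ (del : Bool) (c : Char) (cs : List Char) (i : Nat) :
    pvMarked del (c :: cs) (i + 1)
      = pvMarked (if c = ' ' then false else (del || c = '\'')) cs i := by
  rw [Bool.eq_iff_iff, pvMarked_iff, pvMarked_iff]
  constructor
  · rintro (⟨k, hk, h1, h2⟩ | ⟨hd, h⟩)
    · match k with
      | 0 =>
        simp only [List.getD_cons_zero] at h1
        have hc : c ≠ ' ' := by rw [h1]; decide
        have hns : ∀ j, j ≤ i → cs.getD j ' ' ≠ ' ' := by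
          intro j hj
          have := h2 (j + 1) (by omega) (by omega)
          simpa using this
        rw [if_neg hc]
        exact Or.inr ⟨by simp [h1], hns⟩
      | k + 1 =>
        refine Or.inl ⟨k, by omega, by simpa using h1, ?_⟩
        intro j hj1 hj2
        have := h2 (j + 1) (by omega) (by omega)
        simpa using this
    · have hc : c ≠ ' ' := by
        intro hcs; exact (h 0 (by omega)) (by simp [hcs])
      have hns : ∀ j, j ≤ i → cs.getD j ' ' ≠ ' ' := by
        intro j hj
        have := h (j + 1) (by omega)
        simpa using this
      rw [if_neg hc]
      right
      constructor
      · simp [hd]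
      · exact hns
  · intro h
    by_cases hc : c = ' '
    · rw [if_pos hc] at h
      rcases h with ⟨k, hk, h1, h2⟩ | ⟨hd, _⟩
      · refine Or.inl ⟨k + 1, by omega, by simpa using h1, ?_⟩
        intro j hj1 hj2
        match j with
        | j + 1 => have := h2 j (by omega) (by omega); simpa using this
      · exact absurd hd (by decide)
    · rw [if_neg hc] at h
      rcases h with ⟨k, hk, h1, h2⟩ | ⟨hd, hns⟩
      · refine Or.inl ⟨k + 1, by omega, by simpa using h1, ?_⟩
        intro j hj1 hj2
        match j with
        | j + 1 => have := h2 j (by omega) (by omega); simpa using this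
      · have hall : ∀ j, j ≤ i + 1 → (c :: cs).getD j ' ' ≠ ' ' := by
          intro j hj
          match j with
          | 0 => simpa using hc
          | j + 1 => have := hns j (by omega); simpa using this
        rcases Bool.or_eq_true _ _ |>.mp hd with hd' | hc'
        · exact Or.inr ⟨hd', hall⟩
        · refine Or.inl ⟨0, by omega, by simpa using of_decide_eq_true hc', ?_⟩
          intro j _ hj; exact hall j hj

lemma pvMem_markRun (cs : List Char) (i : Nat) :
    ∀ (m k : Nat) (S : List Nat),
      i ∈ pvMarkRun cs S (List.range' k m) ↔
        i ∈ S ∨ (k ≤ i ∧ i < k + m ∧ ∀ j, k ≤ j → j ≤ i → cs.getD j ' ' ≠ ' ') := by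
  intro m
  induction m with
  | zero => intro k S; simp [pvMarkRun]; omega
  | succ m ih =>
    intro k S
    rw [List.range'_succ, pvMarkRun]
    by_cases hk : cs.getD k ' ' = ' '
    · rw [if_pos hk]
      constructor
      · exact Or.inl
      · rintro (h | ⟨h1, h2, h3⟩)
        · exact h
        · exact absurd hk (h3 k (le_refl k) h1)
    · rw [if_neg hk, ih]
      rw [PySem.Set.mem_add]
      constructor
      · rintro ((h | rfl) | ⟨h1, h2, h3⟩)
        · exact Or.inl h
        · refine Or.inr ⟨le_refl i, by omega, ?_⟩
          intro j hj1 hj2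
          have : j = i := by omega
          subst this; exact hk
        · refine Or.inr ⟨by omega, by omega, ?_⟩
          intro j hj1 hj2
          rcases Nat.eq_or_lt_of_le hj1 with rfl | h
          · exact hk
          · exact h3 j (by omega) hj2
      · rintro (h | ⟨h1, h2, h3⟩)
        · exact Or.inl (Or.inl h)
        · rcases Nat.eq_or_lt_of_le h1 with rfl | h
          · exact Or.inl (Or.inr rfl)
          · exact Or.inr ⟨by omega, by omega, fun j hj1 hj2 => h3 j (by omega) hj2⟩

lemma pvMem_dels (cs : List Char) (i : Nat) :
    ∀ t, t ≤ cs.length →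
      ((i ∈ (List.range t).foldl
        (fun S k => if cs.getD k ' ' = '\'' then pvMarkRun cs S (List.range' k (cs.length - k)) else S)
        PySem.Set.empty) ↔
      ∃ k, k < t ∧ cs.getD k ' ' = '\'' ∧ k ≤ i ∧ i < cs.length ∧
        ∀ j, k ≤ j → j ≤ i → cs.getD j ' ' ≠ ' ') := by
  intro t
  induction t with
  | zero => intro _; simp [PySem.Set.empty]
  | succ t ih =>
    intro ht
    rw [List.range_succ, List.foldl_append, List.foldl_cons, List.foldl_nil]
    by_cases hq : cs.getD t ' ' = '\''
    · rw [if_pos hq, pvMem_markRun]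
      rw [ih (by omega)]
      constructor
      · rintro (⟨k, hk, h1, h2, h3, h4⟩ | ⟨h1, h2, h3⟩)
        · exact ⟨k, by omega, h1, h2, h3, h4⟩
        · exact ⟨t, by omega, hq, h1, by omega, h3⟩
      · rintro ⟨k, hk, h1, h2, h3, h4⟩
        rcases Nat.lt_succ_iff_lt_or_eq.mp hk with h | rfl
        · exact Or.inl ⟨k, h, h1, h2, h3, h4⟩
        · exact Or.inr ⟨h2, by omega, h4⟩
    · rw [if_neg hq, ih (by omega)]
      constructor
      · rintro ⟨k, hk, h⟩; exact ⟨k, by omega, h⟩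
      · rintro ⟨k, hk, h1, h⟩
        rcases Nat.lt_succ_iff_lt_or_eq.mp hk with hlt | rfl
        · exact ⟨k, hlt, h1, h⟩
        · exact absurd h1 hq

-- A-side: the filtered rebuild is the single pass pvGo
lemma pvFilter_eq_go (cs : List Char) : ∀ del,
    ((List.range cs.length).filter (fun i => !pvMarked del cs i)).map (fun i => cs.getD i ' ')
      = pvGo del cs := by
  induction cs with
  | nil => intro del; simp [pvGo]
  | cons c cs ih =>
    intro del
    rw [List.length_cons, List.range_succ_eq_map, List.filter_cons, List.filter_map]
    have htail : ((fun i => !pvMarked del (c :: cs) i) ∘ Nat.succ)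
        = fun i => !pvMarked (if c = ' ' then false else (del || c = '\'')) cs i :=
      funext fun i => by simp only [Function.comp_apply, Nat.succ_eq_add_one, pvMarked_succ]
    rw [htail, pvMarked_zero]
    have hms : ((fun i => (c :: cs).getD i ' ') ∘ Nat.succ) = (fun i => cs.getD i ' ') :=
      funext fun i => rfl
    generalize hd : (if c = ' ' then false else (del || c = '\'')) = d
    by_cases hc : c = ' '
    · have hb : ((c == '\'') || (del && !(c == ' '))) = false := by
        subst hc; cases del <;> decide
      rw [hb, if_pos (by decide), List.map_cons, List.map_map, hms, ih d]
      have hdf : d = false := by rw [← hd, if_pos hc]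
      subst hdf hc
      cases del <;> simp [pvGo]
    · by_cases hdel : ((c == '\'') || (del && !(c == ' '))) = true
      · rw [hdel, if_neg (by decide), List.map_map, hms, ih d]
        have hdd : d = (del || decide (c = '\'')) := by rw [← hd, if_neg hc]
        subst hdd
        rcases Bool.or_eq_true _ _ |>.mp hdel with h | h
        · have hc' : c = '\'' := by simpa using h
          subst hc'
          cases del <;> simp [pvGo]
        · have hdt : del = true := (Bool.and_eq_true _ _ |>.mp h).1
          subst hdt
          simp only [Bool.true_or]
          rw [pvGo, if_neg hc, if_pos rfl]
      · rw [Bool.not_eq_true] at hdel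
        rw [hdel, if_pos (by decide), List.map_cons, List.map_map, hms, ih d, List.getD_cons_zero]
        have hcq : c ≠ '\'' := by
          intro h; subst h; simp at hdel
        have hdel' : del = false := by
          rcases Bool.or_eq_false_iff.mp hdel with ⟨_, h2⟩
          rcases Bool.and_eq_false_iff.mp h2 with h | h
          · exact h
          · exfalso; simp [hc] at h
        subst hdel'
        have hdf : d = false := by
          rw [← hd, if_neg hc]; simp [hcq]
        subst hdf
        rw [pvGo, if_neg hc, if_neg (by decide : ¬false = true), if_neg hcq]

lemma pvSplitc_fst (sepc : Char) (cs : List Char) :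
    (pvSplitc sepc cs).1 = cs.takeWhile (fun c => !(c == sepc)) := by
  induction cs with
  | nil => rfl
  | cons c cs ih =>
    rw [pvSplitc, List.takeWhile_cons]
    by_cases h : c = sepc
    · rw [if_pos h]; simp [h]
    · rw [if_neg h]; simp [h, ih]

lemma pvSplitOn_go_eq (sepc : Char) :
    ∀ fuel (l cur : List Char) (acc : List (List Char)), l.length < fuel →
      PySem.Chars.splitOn.go [sepc] fuel l cur acc
        = acc.reverse ++ (cur.reverse ++ (pvSplitc sepc l).1) :: (pvSplitc sepc l).2 := by
  intro fuel
  induction fuel with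
  | zero => intro l cur acc h; omega
  | succ fuel ih =>
    intro l cur acc h
    match l with
    | [] => simp [PySem.Chars.splitOn.go, pvSplitc]
    | c :: rest =>
      rw [PySem.Chars.splitOn.go]
      by_cases hc : c = sepc
      · have hp : [sepc].isPrefixOf (c :: rest) = true := by simp [List.isPrefixOf, hc]
        rw [if_pos hp]
        have : List.drop [sepc].length (c :: rest) = rest := by simp
        rw [this, ih rest [] _ (by simpa using Nat.lt_of_succ_lt_succ (by simpa using h))]
        rw [pvSplitc, if_pos hc]
        simp
      · have hp : ¬ ([sepc].isPrefixOf (c :: rest) = true) := by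
          simp only [List.isPrefixOf, Bool.and_true, beq_iff_eq]
          exact fun h => hc h.symm
        rw [if_neg hp]
        rw [ih rest (c :: cur) acc (by simpa using Nat.lt_of_succ_lt_succ (by simpa using h))]
        rw [pvSplitc, if_neg hc]
        simp

lemma pvSplitOn_eq (sepc : Char) (cs : List Char) :
    PySem.Chars.splitOn cs [sepc] = (pvSplitc sepc cs).1 :: (pvSplitc sepc cs).2 := by
  rw [PySem.Chars.splitOn, pvSplitOn_go_eq sepc (cs.length + 1) cs [] [] (by omega)]
  simp

-- B-side: the split/cut/rejoin pipeline is the single pass pvGo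
lemma pvGo_join (cs : List Char) : ∀ del,
    pvGo del cs = PySem.Chars.join [' ']
      ((if del then [] else (pvSplitc ' ' cs).1.takeWhile (fun c => !(c == '\'')))
        :: (pvSplitc ' ' cs).2.map (List.takeWhile (fun c => !(c == '\'')))) := by
  induction cs with
  | nil =>
    intro del
    cases del <;> simp [pvGo, pvSplitc, PySem.Chars.join_singleton]
  | cons c cs ih =>
    intro del
    by_cases hc : c = ' '
    · subst hc
      rw [pvGo, if_pos rfl, ih false, pvSplitc, if_pos rfl]
      cases del <;> simp [PySem.Chars.join_cons_cons]
    · rw [pvSplitc, if_neg hc]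
      by_cases hdel : del = true
      · subst hdel
        rw [pvGo, if_neg hc, if_pos rfl, ih true]
        simp
      · have hdf : del = false := by simpa using hdel
        subst hdf
        by_cases hq : c = '\''
        · subst hq
          rw [pvGo, if_neg hc, if_neg (by decide : ¬false = true), if_pos rfl, ih true]
          simp
        · rw [pvGo, if_neg hc, if_neg (by decide : ¬false = true), if_neg hq, ih false]
          simp only [if_neg (by decide : ¬false = true)]
          rw [List.takeWhile_cons]
          rw [if_pos (by simp [hq])]
          generalize (pvSplitc ' ' cs).1.takeWhile (fun c => !(c == '\'')) = x
          generalize ((pvSplitc ' ' cs).2.map (List.takeWhile (fun c => !(c == '\'')))) = xs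
          match xs with
          | [] => simp [PySem.Chars.join_singleton]
          | y :: ys => rw [PySem.Chars.join_cons_cons, PySem.Chars.join_cons_cons]; simp

lemma pvA_eq_go (text : String) : remove_apostrophes text = String.ofList (pvGo false text.toList) := by
  unfold remove_apostrophes
  dsimp only
  set cs := text.toList with hcs
  set n := cs.length with hn
  set dels : PySem.Set Nat := (List.range n).foldl
    (fun S i => if cs.getD i ' ' = '\'' then pvMarkRun cs S (List.range' i (n - i)) else S)
    PySem.Set.empty with hdels
  have hswap : (fun (acc : List Char) i => if i ∈ dels then acc else acc ++ [cs.getD i ' '])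
      = (fun acc i => if ¬ (i ∈ dels) then acc ++ [cs.getD i ' '] else acc) := by
    funext acc i; by_cases h : i ∈ dels <;> simp [h]
  rw [hswap, PySem.List.foldl_append_ite (p := fun i => ¬ (i ∈ dels)) (f := fun i => cs.getD i ' ')]
  rw [List.nil_append]
  have hfc : (List.range n).filter (fun i => decide (¬ i ∈ dels))
      = (List.range n).filter (fun i => !pvMarked false cs i) := by
    apply List.filter_congr
    intro i hi
    have hin : i < n := List.mem_range.mp hi
    rw [decide_not, Bool.eq_iff_iff]
    simp only [Bool.not_eq_true']
    rw [← Bool.not_eq_true, ← Bool.not_eq_true (pvMarked false cs i), not_iff_not]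
    rw [decide_eq_true_iff, hdels, pvMem_dels cs i n (le_refl _), pvMarked_iff]
    constructor
    · rintro ⟨k, _, h1, h2, _, h4⟩; exact Or.inl ⟨k, h2, h1, h4⟩
    · rintro (⟨k, h2, h1, h4⟩ | ⟨h, _⟩)
      · exact ⟨k, by omega, h1, h2, hin, h4⟩
      · exact absurd h (by decide)
  rw [hfc, pvFilter_eq_go]

lemma pvB_eq_go (text : String) : remove_apostrophes_alt text = String.ofList (pvGo false text.toList) := by
  unfold remove_apostrophes_alt
  set cs := text.toList with hcs
  have hsplit : PySem.Str.split? text " " = some ((PySem.Chars.splitOn cs [' ']).map String.ofList) := by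
    rw [PySem.Str.split?, PySem.Chars.split?]
    rfl
  rw [hsplit]
  simp only [Option.getD_some]
  rw [pvSplitOn_eq]
  have htok : ∀ t : List Char,
      ((PySem.Str.split? (String.ofList t) "'").getD []).getD 0 ""
        = String.ofList (pvSplitc '\'' t).1 := by
    intro t
    rw [PySem.Str.split?, PySem.Chars.split?]
    simp only [String.toList_ofList]
    rw [if_neg (by decide), Option.map_some, Option.getD_some]
    rw [show ("'".toList) = ['\''] from rfl, pvSplitOn_eq]
    rfl
  rw [List.map_map]
  have hmaps : (((pvSplitc ' ' cs).1 :: (pvSplitc ' ' cs).2).map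
      ((fun tok => ((PySem.Str.split? tok "'").getD []).getD 0 "") ∘ String.ofList))
      = ((pvSplitc ' ' cs).1 :: (pvSplitc ' ' cs).2).map (fun t => String.ofList (pvSplitc '\'' t).1) := by
    apply List.map_congr_left
    intro t _
    exact htok t
  rw [hmaps]
  rw [PySem.Str.join]
  rw [List.map_map]
  rw [show (String.toList ∘ fun t => String.ofList (pvSplitc '\'' t).1)
      = fun t => (pvSplitc '\'' t).1 from by funext t; simp]
  rw [pvGo_join cs false]
  simp only [if_neg (by decide : ¬false = true)]
  rw [show (" ".toList) = [' '] from rfl]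
  congr 1
  simp only [List.map_cons]
  simp only [pvSplitc_fst]

-- ===== VERDICT (by name: the statement is the Claim_ definition above) =====
theorem remove_apostrophes_spec : Claim_equal_remove_apostrophes := by
  intro text _
  unfold Spec_remove_apostrophes
  rw [pvA_eq_go, pvB_eq_go]
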